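-- pv_equiv track=rewrite | github.com/MrBrantCode/unitest_baseline | mut_generate/mist_train_cf/cf_3079/solution.py | select_third_largest_prime
-- ===== SOURCE A (Python) =====
-- def select_third_largest_prime(arr, min_range, max_range):
--     def is_prime(number):
--         if number < 2:
--             return False
--         for i in range(2, int(number ** 0.5) + 1):
--             if number % i == 0:
--                 return False
--         return True
--
--     prime_numbers = [num for num in set(range(min_range, max_range + 1)) if is_prime(num)]
--     prime_numbers.sort(reverse=True)
--
--     return prime_numbers[2] if len(prime_numbers) >= 3 else None
-- ===== SOURCE B (Python) =====
-- def select_third_largest_prime(arr, min_range, max_range):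
--     def is_prime(n):
--         if n < 2:
--             return False
--         d = 2
--         while d * d <= n:
--             if n % d == 0:
--                 return False
--             d += 1
--         return True
--
--     count = 0
--     n = max_range
--     while n >= min_range:
--         if is_prime(n):
--             count += 1
--             if count == 3:
--                 return n
--         n -= 1
--     return None
-- ===== Notes on version B (the rewrite author's own statement) =====
-- stated objective: alternative
-- what changed: A tests every number in the range, collects all primes, sorts them descending and indexes; B scans downward from max_range with a while-loop trial-division test and returns as soon as the third prime is found, never building or sorting a list.
import Mathlib
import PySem

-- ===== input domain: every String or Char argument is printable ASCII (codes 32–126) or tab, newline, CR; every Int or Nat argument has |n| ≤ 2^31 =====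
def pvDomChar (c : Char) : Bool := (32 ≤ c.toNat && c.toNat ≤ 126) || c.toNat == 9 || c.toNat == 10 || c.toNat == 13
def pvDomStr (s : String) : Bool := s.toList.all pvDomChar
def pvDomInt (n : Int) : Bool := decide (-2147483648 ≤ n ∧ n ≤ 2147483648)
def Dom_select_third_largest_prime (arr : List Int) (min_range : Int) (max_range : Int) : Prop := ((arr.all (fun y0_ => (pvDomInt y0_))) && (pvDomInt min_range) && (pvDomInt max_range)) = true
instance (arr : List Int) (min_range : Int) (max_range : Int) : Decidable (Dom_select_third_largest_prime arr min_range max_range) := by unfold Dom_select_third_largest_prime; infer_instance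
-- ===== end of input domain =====

-- B replaces A's "test every number, sort, index" by a downward scan from max_range that
-- stops at the third prime found, with a while-loop trial-division test (objective: alternative).

-- ===== PORT A =====
-- is_prime: trial division over range(2, int(number**0.5)+1); int(number**0.5) is
-- exactly Nat.sqrt on the domain |number| ≤ 2^31 (double sqrt is exact there).
def pvIsPrimeA (number : Int) : Bool :=
  if number < 2 then false
  else (PySem.List.pyRange 2 ((Nat.sqrt number.toNat : Int) + 1) 1).all
        (fun i => !(PySem.Int.mod number i == 0))

-- set(range(min,max+1)): the range is duplicate-free, so as a set it is exactly the
-- range itself (PySem.Set.ofList_eq_self_of_nodup with PySem.List.nodup_pyRange_one),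
-- and it is consumed only through filter-then-sort, so set iteration order cannot
-- affect the result; ported as the range list.
def select_third_largest_prime (arr : List Int) (min_range : Int) (max_range : Int) : Option Int :=
  let prime_numbers :=
    (PySem.List.pyRange min_range (max_range + 1) 1).filter pvIsPrimeA
  let sortedP := PySem.List.sorted prime_numbers (fun x => x) true
  if sortedP.length ≥ 3 then PySem.List.pyGet? sortedP 2 else none

-- ===== PORT B =====
-- while d * d <= n: if n % d == 0: return False; d += 1
def pvTrialB (n : Int) (d : Int) : Bool :=
  if _h : d * d ≤ n then
    if PySem.Int.mod n d == 0 then false else pvTrialB n (d + 1)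
  else true
termination_by (n + 1 - d).toNat
decreasing_by
  have hd : d ≤ n := by nlinarith [sq_nonneg d, sq_nonneg (d - 1)]
  omega

def pvIsPrimeB (n : Int) : Bool :=
  if n < 2 then false else pvTrialB n 2

-- while n >= min_range: if is_prime(n): count += 1; if count == 3: return n; n -= 1
def pvScanDown (min_range : Int) (count : Int) (n : Int) : Option Int :=
  if _h : n ≥ min_range then
    if pvIsPrimeB n then
      if count + 1 == 3 then some n
      else pvScanDown min_range (count + 1) (n - 1)
    else pvScanDown min_range count (n - 1)
  else none
termination_by (n + 1 - min_range).toNat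
decreasing_by all_goals omega

def select_third_largest_prime_alt (arr : List Int) (min_range : Int) (max_range : Int) : Option Int :=
  pvScanDown min_range 0 max_range

-- ===== PRECONDITION & SPEC =====
def Spec_select_third_largest_prime (arr : List Int) (min_range : Int) (max_range : Int) (out : Option Int) : Prop := out = select_third_largest_prime_alt arr min_range max_range
instance (arr : List Int) (min_range : Int) (max_range : Int) (out : Option Int) : Decidable (Spec_select_third_largest_prime arr min_range max_range out) := by unfold Spec_select_third_largest_prime; infer_instance

-- ===== CLAIM (what is proved, stated in full; the proofs are below) =====
def Claim_equal_select_third_largest_prime : Prop := ∀ (arr : List Int) (min_range : Int) (max_range : Int), Dom_select_third_largest_prime arr min_range max_range → Spec_select_third_largest_prime arr min_range max_range (select_third_largest_prime arr min_range max_range)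

-- ===== LEMMAS AND PROOFS =====

-- the common mathematical content: "2 ≤ n and no divisor e with 2 ≤ e and e*e ≤ n"
def pvNoSmallDiv (n : Int) : Prop := ∀ e : Int, 2 ≤ e → e * e ≤ n → ¬ e ∣ n

theorem pv_sq_toNat_le {e n : Int} (h2 : 2 ≤ e) (hn : 0 ≤ n) :
    e.toNat * e.toNat ≤ n.toNat ↔ e * e ≤ n := by
  have he : (e.toNat : Int) = e := by omega
  have hnn : (n.toNat : Int) = n := by omega
  constructor
  · intro h
    have h' : ((e.toNat * e.toNat : Nat) : Int) ≤ (n.toNat : Int) := by exact_mod_cast h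
    push_cast at h'; rw [he, hnn] at h'; exact h'
  · intro h
    have h' : ((e.toNat : Int)) * ((e.toNat : Int)) ≤ ((n.toNat : Int)) := by rw [he, hnn]; exact h
    exact_mod_cast h'

theorem pvIsPrimeA_iff (n : Int) : pvIsPrimeA n = true ↔ 2 ≤ n ∧ pvNoSmallDiv n := by
  unfold pvIsPrimeA pvNoSmallDiv
  by_cases hn : n < 2
  · simp only [if_pos hn, Bool.false_eq_true, false_iff]
    exact fun h => absurd h.1 (by omega)
  · rw [not_lt] at hn
    simp only [if_neg (by omega : ¬ n < 2), List.all_eq_true, PySem.List.mem_pyRange_one]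
    constructor
    · intro h
      refine ⟨hn, fun e he2 hee hdvd => ?_⟩
      have hes : e ≤ (Nat.sqrt n.toNat : Int) := by
        have h1 : e.toNat ≤ Nat.sqrt n.toNat :=
          Nat.le_sqrt.mpr ((pv_sq_toNat_le he2 (by omega)).mpr hee)
        omega
      have := h e ⟨he2, by omega⟩
      rw [(PySem.Int.mod_eq_zero_iff_dvd n e).mpr hdvd] at this
      simp at this
    · rintro ⟨-, h⟩ i ⟨hi2, his⟩
      have hii : i * i ≤ n := (pv_sq_toNat_le hi2 (by omega)).mp (Nat.le_sqrt.mp (by omega))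
      have := h i hi2 hii
      simp only [Bool.not_eq_eq_eq_not, Bool.not_true, beq_eq_false_iff_ne, ne_eq]
      intro hm
      exact this ((PySem.Int.mod_eq_zero_iff_dvd n i).mp hm)

theorem pvTrialB_iff (n : Int) (d : Int) (hd : 2 ≤ d) :
    pvTrialB n d = true ↔ ∀ e : Int, d ≤ e → e * e ≤ n → ¬ e ∣ n := by
  fun_induction pvTrialB n d with
  | case1 d h hm =>
    simp only [Bool.false_eq_true, false_iff]
    intro hall
    exact absurd ((PySem.Int.mod_eq_zero_iff_dvd n d).mp (by simpa using hm))
      (hall d le_rfl h)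
  | case2 d h hm ih =>
    rw [ih (by omega)]
    constructor
    · intro hall e hde hee
      rcases eq_or_lt_of_le hde with rfl | hlt
      · intro hdvd
        exact absurd ((PySem.Int.mod_eq_zero_iff_dvd n d).mpr hdvd) (by simpa using hm)
      · exact hall e (by omega) hee
    · intro hall e hde hee
      exact hall e (by omega) hee
  | case3 d h =>
    simp only [true_iff]
    intro e hde hee hdvd
    nlinarith

theorem pvIsPrimeB_eq_A (n : Int) : pvIsPrimeB n = pvIsPrimeA n := by
  by_cases hn : n < 2
  · simp [pvIsPrimeB, pvIsPrimeA, hn]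
  · have h1 : pvIsPrimeB n = true ↔ pvIsPrimeA n = true := by
      rw [pvIsPrimeA_iff]
      unfold pvIsPrimeB
      rw [if_neg hn, pvTrialB_iff n 2 le_rfl]
      unfold pvNoSmallDiv
      constructor
      · exact fun h => ⟨by omega, h⟩
      · exact fun h => h.2
    cases hB : pvIsPrimeB n <;> cases hA : pvIsPrimeA n <;> simp_all

-- the scan invariant: pvScanDown with count c returns the (2-c)-th element of the
-- reversed ascending list of numbers in [min_range, n] passing pvIsPrimeB
theorem pvScanDown_eq (min_range c n : Int) (hc : 0 ≤ c ∧ c ≤ 2) :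
    pvScanDown min_range c n =
      (((PySem.List.pyRange min_range (n + 1) 1).filter pvIsPrimeB).reverse)[(2 - c).toNat]? := by
  fun_induction pvScanDown min_range c n with
  | case1 c n h hp h3 =>
    have hc2 : c = 2 := by have := beq_iff_eq.mp h3; omega
    subst hc2
    rw [PySem.List.pyRange_one_succ_right (by omega : min_range ≤ n)]
    simp [List.filter_append, hp]
  | case2 c n h hp h3 ih =>
    have hc1 : c ≤ 1 := by
      have : ¬ c + 1 = 3 := by simpa using h3
      omega
    rw [ih ⟨by omega, by omega⟩]
    rw [PySem.List.pyRange_one_succ_right (by omega : min_range ≤ n)]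
    have hn1 : n - 1 + 1 = n := by omega
    rw [hn1]
    simp only [List.filter_append, List.reverse_append, List.filter_cons, hp,
      List.filter_nil]
    have hidx : (2 - c).toNat = (2 - (c + 1)).toNat + 1 := by omega
    rw [hidx]
    simp
  | case3 c n h hp ih =>
    rw [ih hc]
    rw [PySem.List.pyRange_one_succ_right (by omega : min_range ≤ n)]
    have hn1 : n - 1 + 1 = n := by omega
    rw [hn1]
    simp [List.filter_append, hp]
  | case4 c n h =>
    rw [PySem.List.pyRange_one_eq_nil (by omega : n + 1 ≤ min_range)]
    simp

-- ===== VERDICT (by name: the statement is the Claim_ definition above) =====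
theorem select_third_largest_prime_spec : Claim_equal_select_third_largest_prime := by
  intro arr min_range max_range _
  unfold Spec_select_third_largest_prime select_third_largest_prime select_third_largest_prime_alt
  set L := PySem.List.pyRange min_range (max_range + 1) 1 with hL
  have hfB : L.filter pvIsPrimeA = L.filter pvIsPrimeB :=
    List.filter_congr (fun x _ => (pvIsPrimeB_eq_A x).symm)
  have hsorted : PySem.List.sorted (L.filter pvIsPrimeA) (fun x => x) true
      = (L.filter pvIsPrimeA).reverse := by
    apply PySem.List.sorted_rev_eq_of_perm_of_pairwise_gt
    · exact (L.filter pvIsPrimeA).reverse_perm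
    · exact List.pairwise_reverse.mpr
        ((PySem.List.pairwise_lt_pyRange_one min_range (max_range + 1)).filter pvIsPrimeA)
  rw [pvScanDown_eq min_range 0 max_range ⟨le_rfl, by omega⟩]
  show (if (PySem.List.sorted (L.filter pvIsPrimeA) (fun x => x) true).length ≥ 3 then
      PySem.List.pyGet? (PySem.List.sorted (L.filter pvIsPrimeA) (fun x => x) true) 2 else none) = _
  rw [hsorted, ← hfB]
  set R := (L.filter pvIsPrimeA).reverse with hR
  by_cases hlen : R.length ≥ 3
  · rw [if_pos hlen, PySem.List.pyGet?_of_nonneg R (by omega)]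
    rfl
  · rw [if_neg hlen, List.getElem?_eq_none (by omega)]
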